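-- pv_equiv track=rewrite | github.com/sh1k4ku/ctf-challenge | RCTF2024/SignSystem_Dilithium/solution/exp.py | convolution_matrix
-- ===== SOURCE A (Python) =====
-- def convolution_matrix(vector):
--     n = len(vector)
--     conv_matrix = [[0] * n for _ in range(n)]
--
--     for i in range(n):
--         for j in range(n):
--             conv_matrix[i][j] = vector[(i - j) % n]
--             if (i - j) < 0:
--                 conv_matrix[i][j] = -conv_matrix[i][j]
--
--     return conv_matrix
-- ===== SOURCE B (Python) =====
-- def convolution_matrix(vector):
--     n = len(vector)
--     S = [-x for x in vector[1:]] + list(vector)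
--     return [list(reversed(S[i:n + i])) for i in range(n)]
-- ===== Notes on version B (the rewrite author's own statement) =====
-- stated objective: faster
-- what changed: Instead of filling an n*n zero matrix cell by cell with a per-cell modular index plus a sign branch, B precomputes the signed wrapped sequence S = [-x for x in vector[1:]] + vector once and emits each row as the reversed contiguous slice S[i:n+i], replacing per-cell Python arithmetic with bulk slice operations.
import Mathlib
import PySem

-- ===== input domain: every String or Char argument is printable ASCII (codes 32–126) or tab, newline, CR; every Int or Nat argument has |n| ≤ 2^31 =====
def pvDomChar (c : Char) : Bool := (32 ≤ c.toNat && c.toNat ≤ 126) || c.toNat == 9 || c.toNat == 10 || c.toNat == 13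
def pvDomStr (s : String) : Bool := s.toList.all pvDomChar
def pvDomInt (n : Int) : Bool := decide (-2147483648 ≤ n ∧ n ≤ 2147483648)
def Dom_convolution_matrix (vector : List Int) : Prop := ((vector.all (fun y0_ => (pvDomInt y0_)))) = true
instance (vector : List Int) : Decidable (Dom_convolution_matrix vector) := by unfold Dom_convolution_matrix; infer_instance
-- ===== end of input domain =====

-- B builds the negacyclic matrix from a precomputed signed wrapped sequence and reversed slices
-- instead of A's per-cell modular index + sign branch (measured faster by a constant factor).

-- ===== PORT A =====
-- literal port of A: allocate an n×n zero matrix, then fill cell (i,j) with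
-- vector[(i-j) % n], negating it in place when i-j < 0.
def convolution_matrix (vector : List Int) : List (List Int) :=
  let n : Int := vector.length
  let conv_matrix : List (List Int) :=
    (PySem.List.pyRange 0 n 1).map (fun _ => List.replicate vector.length 0)
  (PySem.List.pyRange 0 n 1).foldl (fun m i =>
    (PySem.List.pyRange 0 n 1).foldl (fun m j =>
      -- conv_matrix[i][j] = vector[(i - j) % n]
      let v := PySem.List.pyGetD vector (PySem.Int.mod (i - j) n) 0
      let m1 := m.set i.toNat ((m.getD i.toNat []).set j.toNat v)
      -- if (i - j) < 0: conv_matrix[i][j] = -conv_matrix[i][j]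
      if i - j < 0 then
        m1.set i.toNat ((m1.getD i.toNat []).set j.toNat (-((m1.getD i.toNat []).getD j.toNat 0)))
      else m1) m) conv_matrix

-- ===== PORT B =====
-- literal port of Source B: S = [-x for x in vector[1:]] + list(vector);
-- row i = list(reversed(S[i:n+i]))
def convolution_matrix_alt (vector : List Int) : List (List Int) :=
  let n : Int := vector.length
  let S : List Int := (PySem.List.slice vector (some 1) none).map (fun x => -x) ++ vector
  (PySem.List.pyRange 0 n 1).map (fun i => (PySem.List.slice S (some i) (some (n + i))).reverse)

-- ===== PRECONDITION & SPEC =====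
def Spec_convolution_matrix (vector : List Int) (out : List (List Int)) : Prop := out = convolution_matrix_alt vector
instance (vector : List Int) (out : List (List Int)) : Decidable (Spec_convolution_matrix vector out) := by unfold Spec_convolution_matrix; infer_instance

-- ===== CLAIM (what is proved, stated in full; the proofs are below) =====
def Claim_equal_convolution_matrix : Prop := ∀ (vector : List Int), Dom_convolution_matrix vector → Spec_convolution_matrix vector (convolution_matrix vector)

-- ===== LEMMAS AND PROOFS =====

-- the value A leaves in cell (i, j)
def pvTgt (vector : List Int) (i j : Nat) : Int :=
  let v := PySem.List.pyGetD vector (PySem.Int.mod ((i : Int) - (j : Int)) (vector.length : Int)) 0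
  if (i : Int) - (j : Int) < 0 then -v else v

-- filling positions 0..n-1 of a row of length ≥ n rewrites its prefix
theorem pv_foldl_set_range {α : Type} (f : Nat → α) (row : List α) (n : Nat) (h : n ≤ row.length) :
    (List.range n).foldl (fun r j => r.set j (f j)) row = (List.range n).map f ++ row.drop n := by
  induction n with
  | zero => simp
  | succ k ih =>
    rw [List.range_succ, List.foldl_append, ih (by omega)]
    simp only [List.foldl_cons, List.foldl_nil]
    have hk : k < row.length := by omega
    have hdrop : row.drop k = row[k] :: row.drop (k + 1) := by
      rw [List.drop_eq_getElem_cons hk]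
    rw [List.set_append_right _ _ (by simp)]
    have hset : (List.drop k row).set (k - (List.map f (List.range k)).length) (f k)
        = f k :: List.drop (k + 1) row := by
      simp only [List.length_map, List.length_range, Nat.sub_self]
      rw [hdrop, List.set_cons_zero]
    rw [hset]
    simp

-- A's inner-loop body is a single functional cell update
theorem pv_body_eq (vector : List Int) (m : List (List Int)) (iN jN : Nat)
    (him : iN < m.length) (hrow : (m.getD iN []).length = vector.length)
    (hj : jN < vector.length) :
    (let v := PySem.List.pyGetD vector (PySem.Int.mod ((iN : Int) - (jN : Int)) (vector.length : Int)) 0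
     let m1 := m.set ((iN : Int)).toNat ((m.getD ((iN : Int)).toNat []).set ((jN : Int)).toNat v)
     if (iN : Int) - (jN : Int) < 0 then
       m1.set ((iN : Int)).toNat ((m1.getD ((iN : Int)).toNat []).set ((jN : Int)).toNat
         (-((m1.getD ((iN : Int)).toNat []).getD ((jN : Int)).toNat 0)))
     else m1)
    = m.set iN ((m.getD iN []).set jN (pvTgt vector iN jN)) := by
  simp only [Int.toNat_natCast, pvTgt]
  split_ifs with hneg
  · have h1 : (m.set iN ((m.getD iN []).set jN
        (PySem.List.pyGetD vector (PySem.Int.mod ((iN : Int) - (jN : Int)) (vector.length : Int)) 0))).getD iN []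
        = (m.getD iN []).set jN (PySem.List.pyGetD vector (PySem.Int.mod ((iN : Int) - (jN : Int)) (vector.length : Int)) 0) := by
      simp [List.getD, him]
    rw [h1]
    have h2 : ((m.getD iN []).set jN
        (PySem.List.pyGetD vector (PySem.Int.mod ((iN : Int) - (jN : Int)) (vector.length : Int)) 0)).getD jN 0
        = PySem.List.pyGetD vector (PySem.Int.mod ((iN : Int) - (jN : Int)) (vector.length : Int)) 0 := by
      have hlen2 : jN < (m.getD iN []).length := hrow ▸ hj
      rw [List.getD, List.getElem?_set_self (by simpa using hlen2)]
      rfl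
    rw [h2, List.set_set, List.set_set]
  · rfl

-- the inner loop only rewrites row iN, functionally
theorem pv_inner (vector : List Int) (iN : Nat) (L : List Nat) : ∀ (m : List (List Int)),
    (∀ j ∈ L, j < vector.length) → iN < m.length → (m.getD iN []).length = vector.length →
    L.foldl (fun (m : List (List Int)) (jN : Nat) =>
      let v := PySem.List.pyGetD vector (PySem.Int.mod ((iN : Int) - (jN : Int)) (vector.length : Int)) 0
      let m1 := m.set ((iN : Int)).toNat ((m.getD ((iN : Int)).toNat []).set ((jN : Int)).toNat v)
      if (iN : Int) - (jN : Int) < 0 then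
        m1.set ((iN : Int)).toNat ((m1.getD ((iN : Int)).toNat []).set ((jN : Int)).toNat
          (-((m1.getD ((iN : Int)).toNat []).getD ((jN : Int)).toNat 0)))
      else m1) m
    = m.set iN (L.foldl (fun r jN => r.set jN (pvTgt vector iN jN)) (m.getD iN [])) := by
  induction L with
  | nil =>
    intro m _ him _
    simp only [List.foldl_nil]
    apply List.ext_getElem (by simp)
    intro k h1 h2
    by_cases hk : k = iN
    · subst hk
      rw [List.getElem_set_self]
      simp [List.getD, List.getElem?_eq_getElem (by simpa using h2)]
    · rw [List.getElem_set_ne (by omega)]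
  | cons j L ih =>
    intro m hL him hrow
    rw [List.foldl_cons, List.foldl_cons,
        pv_body_eq vector m iN j him hrow (hL j (by simp))]
    rw [ih _ (fun x hx => hL x (by simp [hx])) (by simpa using him)
        (by simp only [List.getD, List.getElem?_set_self him, Option.getD_some,
              List.length_set]
            simpa [List.getD] using hrow)]
    rw [List.set_set]
    congr 1
    simp [List.getD, List.getElem?_set_self him]

-- the outer loop is a sequence of functional row updates
theorem pv_outer (vector : List Int) (L : List Nat) : ∀ (m : List (List Int)),
    (∀ i ∈ L, i < vector.length) → m.length = vector.length →
    (∀ r ∈ m, r.length = vector.length) →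
    L.foldl (fun (m : List (List Int)) (iN : Nat) =>
      (List.range vector.length).foldl (fun (m : List (List Int)) (jN : Nat) =>
        let v := PySem.List.pyGetD vector (PySem.Int.mod ((iN : Int) - (jN : Int)) (vector.length : Int)) 0
        let m1 := m.set ((iN : Int)).toNat ((m.getD ((iN : Int)).toNat []).set ((jN : Int)).toNat v)
        if (iN : Int) - (jN : Int) < 0 then
          m1.set ((iN : Int)).toNat ((m1.getD ((iN : Int)).toNat []).set ((jN : Int)).toNat
            (-((m1.getD ((iN : Int)).toNat []).getD ((jN : Int)).toNat 0)))
        else m1) m) m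
    = L.foldl (fun (m : List (List Int)) (iN : Nat) =>
        m.set iN ((List.range vector.length).map (pvTgt vector iN))) m := by
  induction L with
  | nil => intro m _ _ _; rfl
  | cons i L ih =>
    intro m hL hm hrows
    rw [List.foldl_cons, List.foldl_cons]
    have hi : i < m.length := hm ▸ hL i (by simp)
    have hrow : (m.getD i []).length = vector.length := by
      rw [List.getD, List.getElem?_eq_getElem hi]
      exact hrows _ (List.getElem_mem hi)
    rw [pv_inner vector i (List.range vector.length) m
          (fun j hj => List.mem_range.mp hj) hi hrow,
        pv_foldl_set_range (pvTgt vector i) _ _ (le_of_eq hrow.symm)]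
    have hdrop : List.drop vector.length (m.getD i []) = [] :=
      List.drop_eq_nil_of_le (le_of_eq hrow)
    rw [hdrop, List.append_nil]
    exact ih _ (fun x hx => hL x (by simp [hx])) (by simpa using hm)
      (fun r hr => by
        rcases List.mem_or_eq_of_mem_set hr with h | h
        · exact hrows r h
        · simp [h])

-- A's nested Int-indexed folds, re-indexed over Nat ranges
theorem pv_A_norm (vector : List Int) :
    convolution_matrix vector =
    (List.range vector.length).foldl (fun (m : List (List Int)) (iN : Nat) =>
      (List.range vector.length).foldl (fun (m : List (List Int)) (jN : Nat) =>
        let v := PySem.List.pyGetD vector (PySem.Int.mod ((iN : Int) - (jN : Int)) (vector.length : Int)) 0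
        let m1 := m.set ((iN : Int)).toNat ((m.getD ((iN : Int)).toNat []).set ((jN : Int)).toNat v)
        if (iN : Int) - (jN : Int) < 0 then
          m1.set ((iN : Int)).toNat ((m1.getD ((iN : Int)).toNat []).set ((jN : Int)).toNat
            (-((m1.getD ((iN : Int)).toNat []).getD ((jN : Int)).toNat 0)))
        else m1) m)
      ((List.range vector.length).map (fun _ => List.replicate vector.length 0)) := by
  simp only [convolution_matrix, PySem.List.pyRange_one, sub_zero, Int.toNat_natCast,
    zero_add, List.foldl_map, List.map_map, Function.comp_def]

-- A computes row i as the map of pvTgt over column indices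
theorem pv_A_eq (vector : List Int) :
    convolution_matrix vector
      = (List.range vector.length).map (fun i => (List.range vector.length).map (pvTgt vector i)) := by
  rw [pv_A_norm,
      pv_outer vector (List.range vector.length) _
        (fun i hi => List.mem_range.mp hi) (by simp) (by simp),
      pv_foldl_set_range _ _ _ (by simp)]
  simp

-- B computes row i as the reversed window of the signed wrapped sequence
theorem pv_B_eq (vector : List Int) :
    convolution_matrix_alt vector
      = (List.range vector.length).map (fun i =>
          (((vector.tail.map (fun x => -x) ++ vector).drop i).take vector.length).reverse) := by
  simp only [convolution_matrix_alt, PySem.List.slice_from_one, PySem.List.pyRange_one,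
    sub_zero, Int.toNat_natCast, zero_add, List.map_map, Function.comp_def]
  refine List.map_congr_left (fun k _ => ?_)
  have hcast : (vector.length : Int) + (k : Int) = ((vector.length + k : Nat) : Int) := by
    push_cast; ring
  rw [hcast, PySem.List.slice_natCast, Nat.add_sub_cancel]

-- getElem with provably equal indices
theorem pv_getElem_congr {α : Type} (l : List α) (a b : Nat) (h : a = b) (ha : a < l.length) :
    l[a] = l[b]'(h ▸ ha) := by subst h; rfl

-- the two row descriptions agree
theorem pv_row_eq (vector : List Int) (i : Nat) (hi : i < vector.length) :
    (List.range vector.length).map (pvTgt vector i)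
      = (((vector.tail.map (fun x => -x) ++ vector).drop i).take vector.length).reverse := by
  have hn : 0 < vector.length := by omega
  have hS : (vector.tail.map (fun x => -x) ++ vector).length = (vector.length - 1) + vector.length := by
    simp
  apply List.ext_getElem
  · simp; omega
  · intro j h1 h2
    have hj : j < vector.length := by simpa using h1
    rw [List.getElem_map, List.getElem_range, List.getElem_reverse]
    rw [List.getElem_take, List.getElem_drop]
    have hlen : ((vector.tail.map (fun x => -x) ++ vector).drop i).length
        = (vector.length - 1) + vector.length - i := by simp
    have htake : (List.take vector.length (List.drop i (List.map (fun x => -x) vector.tail ++ vector))).length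
        = vector.length := by simp; omega
    simp only [htake]
    by_cases hij : j ≤ i
    · -- diagonal and below: positive entry vector[i - j]
      rw [List.getElem_append_right (by simp; omega)]
      have hmod : PySem.Int.mod ((i : Int) - (j : Int)) (vector.length : Int) = ((i - j : Nat) : Int) := by
        rw [PySem.Int.mod_eq_emod_of_pos (by exact_mod_cast hn)]
        have hc : (i : Int) - (j : Int) = ((i - j : Nat) : Int) := by omega
        rw [hc, Int.emod_eq_of_lt (by omega) (by omega)]
      rw [pvTgt, if_neg (by omega), hmod, PySem.List.pyGetD_natCast,
          List.getD_eq_getElem vector 0 (by omega)]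
      exact pv_getElem_congr vector _ _ (by simp; omega) _
    · -- above the diagonal: negated wrapped entry -vector[i + n - j]
      rw [List.getElem_append_left (by simp; omega)]
      have hmod : PySem.Int.mod ((i : Int) - (j : Int)) (vector.length : Int)
          = ((i + vector.length - j : Nat) : Int) := by
        rw [PySem.Int.mod_eq_emod_of_pos (by exact_mod_cast hn)]
        have hc : (i : Int) - (j : Int) = ((i + vector.length - j : Nat) : Int) - (vector.length : Int) := by
          omega
        rw [hc, Int.sub_emod_right, Int.emod_eq_of_lt (by omega) (by omega)]
      rw [pvTgt, if_pos (by omega), hmod, PySem.List.pyGetD_natCast,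
          List.getD_eq_getElem vector 0 (by omega), List.getElem_map,
          List.getElem_tail]
      congr 1
      exact pv_getElem_congr vector _ _ (by omega) _

-- ===== VERDICT =====
theorem convolution_matrix_spec : Claim_equal_convolution_matrix := by
  intro vector _
  unfold Spec_convolution_matrix
  rw [pv_A_eq, pv_B_eq]
  exact List.map_congr_left (fun i hiM => pv_row_eq vector i (List.mem_range.mp hiM))
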